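-- pv_equiv track=rewrite | github.com/austral-prog/tp-7-facuhenest | tp-7-facuhenest-main/loops_and_print.py | enumerate_backwards
-- ===== SOURCE A (Python) =====
-- def enumerate_backwards(lista):
--     new_list = []
--     counter = 0
--     for indice, valor in enumerate(lista):
--         if valor:
--             new_element = f"{counter}. {valor[::-1]}"
--             new_list.append(new_element)
--             counter += 1
--     return new_list
-- ===== SOURCE B (Python) =====
-- def enumerate_backwards(lista):
--     # Traverse backwards: indices are assigned by counting DOWN from the
--     # number of truthy items, and the output is built back-to-front.
--     k = sum(1 for v in lista if v)
--     out = []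
--     for v in reversed(lista):
--         if v:
--             k -= 1
--             out.append(f"{k}. {v[::-1]}")
--     out.reverse()
--     return out
-- ===== Notes on version B (the rewrite author's own statement) =====
-- stated objective: alternative
-- what changed: B traverses the list in reverse and builds the output back-to-front, assigning each kept item an index by counting down from the precomputed total of truthy items, instead of A's forward loop with an incrementing counter.
import Mathlib
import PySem

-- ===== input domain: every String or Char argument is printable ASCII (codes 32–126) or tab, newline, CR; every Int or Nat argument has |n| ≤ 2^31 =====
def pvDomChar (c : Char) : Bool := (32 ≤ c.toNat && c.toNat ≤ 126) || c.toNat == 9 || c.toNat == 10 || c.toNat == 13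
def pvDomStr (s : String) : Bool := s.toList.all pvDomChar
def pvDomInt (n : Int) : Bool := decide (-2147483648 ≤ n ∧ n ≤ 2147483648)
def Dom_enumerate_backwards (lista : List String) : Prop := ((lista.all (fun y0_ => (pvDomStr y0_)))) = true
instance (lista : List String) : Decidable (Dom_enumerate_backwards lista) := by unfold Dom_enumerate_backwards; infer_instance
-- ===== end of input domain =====

-- B is an alternative of the same cost: it traverses the list in reverse, counting down from
-- the precomputed number of truthy items, and builds the output back-to-front. Return value only.

-- ===== PORT A =====
-- valor[::-1] = reverse (PySem.Str.slice? step -1 is total here; getD "" is never taken)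
def pvRev (s : String) : String := (PySem.Str.slice? s none none (-1)).getD ""

def enumerate_backwards (lista : List String) : List String :=
  (((PySem.List.enumerate lista 0).foldl
      (fun (st : List String × Int) iv =>
        if iv.2 ≠ "" then
          (st.1 ++ [PySem.Int.toStr st.2 ++ ". " ++ pvRev iv.2], st.2 + 1)
        else st)
      ([], 0))).1

-- ===== PORT B =====
-- k = sum(1 for v in lista if v)
def pvCnt (lista : List String) : Int :=
  lista.foldl (fun a v => if v ≠ "" then a + 1 else a) 0

def enumerate_backwards_alt (lista : List String) : List String :=
  let st := lista.reverse.foldl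
      (fun (st : List String × Int) v =>
        if v ≠ "" then
          (st.1 ++ [PySem.Int.toStr (st.2 - 1) ++ ". " ++ pvRev v], st.2 - 1)
        else st)
      ([], pvCnt lista)
  st.1.reverse

-- ===== PRECONDITION & SPEC =====
def Spec_enumerate_backwards (lista : List String) (out : List String) : Prop := out = enumerate_backwards_alt lista
instance (lista : List String) (out : List String) : Decidable (Spec_enumerate_backwards lista out) := by unfold Spec_enumerate_backwards; infer_instance

-- ===== CLAIM (what is proved, stated in full; the proofs are below) =====
def Claim_equal_enumerate_backwards : Prop := ∀ (lista : List String), Dom_enumerate_backwards lista → Spec_enumerate_backwards lista (enumerate_backwards lista)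

-- ===== LEMMAS AND PROOFS =====

def pvF (c : Int) (v : String) : String := PySem.Int.toStr c ++ ". " ++ pvRev v

-- A-side loop invariant: the forward counter loop appends B's "map over enumerated filter".
theorem eb_loopA (lista : List String) (s : Int) (acc : List String) (c : Int) :
    ((PySem.List.enumerate lista s).foldl
      (fun (st : List String × Int) iv =>
        if iv.2 ≠ "" then
          (st.1 ++ [PySem.Int.toStr st.2 ++ ". " ++ pvRev iv.2], st.2 + 1)
        else st)
      (acc, c)).1
    = acc ++ (PySem.List.enumerate (lista.filter (fun v => v ≠ "")) c).map
        (fun iv => pvF iv.1 iv.2) := by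
  induction lista generalizing s acc c with
  | nil => simp [PySem.List.enumerate_nil]
  | cons x xs ih =>
    rw [PySem.List.enumerate_cons, List.foldl_cons]
    by_cases hx : x = ""
    · rw [if_neg (by simp [hx]), ih]
      simp [hx]
    · rw [if_pos (by simp [hx]), ih]
      simp [hx, PySem.List.enumerate_cons, pvF]

theorem pvCnt_from (lista : List String) (a : Int) :
    lista.foldl (fun a v => if v ≠ "" then a + 1 else a) a
      = a + (lista.filter (fun v => v ≠ "")).length := by
  induction lista generalizing a with
  | nil => simp
  | cons x xs ih =>
    by_cases hx : x = ""
    · rw [List.foldl_cons, if_neg (by simp [hx]), ih]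
      simp [hx]
    · rw [List.foldl_cons, if_pos (by simp [hx]), ih]
      simp [hx]
      ring

-- B-side loop invariant (stated as a foldr via foldl over reverse): starting the countdown at
-- c + (number of truthy items), the loop produces B's entries in reverse order.
theorem eb_loopB (lista : List String) (acc : List String) (c : Int) :
    lista.reverse.foldl
      (fun (st : List String × Int) v =>
        if v ≠ "" then
          (st.1 ++ [PySem.Int.toStr (st.2 - 1) ++ ". " ++ pvRev v], st.2 - 1)
        else st)
      (acc, c + ((lista.filter (fun v => v ≠ "")).length : Int))
    = (acc ++ ((PySem.List.enumerate (lista.filter (fun v => v ≠ "")) c).map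
        (fun iv => pvF iv.1 iv.2)).reverse, c) := by
  induction lista generalizing acc c with
  | nil => simp [PySem.List.enumerate_nil]
  | cons x xs ih =>
    by_cases hx : x = ""
    · simp only [List.reverse_cons, List.foldl_append, List.foldl_cons, List.foldl_nil]
      rw [show (List.filter (fun v => decide (v ≠ "")) (x :: xs)) = xs.filter (fun v => v ≠ "") by simp [hx]]
      rw [ih]
      simp [hx]
    · simp only [List.reverse_cons, List.foldl_append, List.foldl_cons, List.foldl_nil]
      rw [show (List.filter (fun v => decide (v ≠ "")) (x :: xs)) = x :: xs.filter (fun v => v ≠ "") by simp [hx]]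
      have : c + (((x :: xs.filter (fun v => v ≠ "")).length : Int)) = (c + 1) + ((xs.filter (fun v => v ≠ "")).length : Int) := by
        simp; ring
      rw [this, ih]
      simp [hx, PySem.List.enumerate_cons, pvF]

-- ===== VERDICT (by name: the statement is the Claim_ definition above) =====
theorem enumerate_backwards_spec : Claim_equal_enumerate_backwards := by
  intro lista _
  show _ = _
  rw [enumerate_backwards, enumerate_backwards_alt, eb_loopA]
  have hc : pvCnt lista = 0 + ((lista.filter (fun v => v ≠ "")).length : Int) := by
    rw [pvCnt, pvCnt_from]
  rw [hc, eb_loopB]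
  simp
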